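-- pv_equiv track=rewrite | github.com/LeonYang95/UTGen_LLM | utils/JavaAnalyzer.py | extract_assertion_from_response
-- ===== SOURCE A (Python) =====
-- def extract_assertion_from_response(response: str):
--     lines = response.split('\n')
--     in_block = False
--     cand_lines = []
--     for line in lines:
--         line = line.strip()
--         if line.startswith('```'):
--             if in_block:
--                 break
--             else:
--                 in_block = True
--                 continue
--         else:
--             if line.startswith('Assert'):
--                 cand_lines.append(line[7:])
--             elif line.startswith('assert'):
--                 cand_lines.append(line)
--             else:
--                 continue
--     return '\n'.join(cand_lines)
-- ===== SOURCE B (Python) =====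
-- def _stop_index(lines):
--     # index of the second code-fence line, or len(lines) if there are fewer than two
--     seen_fence = False
--     for i, line in enumerate(lines):
--         if line.startswith('```'):
--             if seen_fence:
--                 return i
--             seen_fence = True
--     return len(lines)
--
--
-- def _pick(line):
--     # a stripped line contributes line[7:] if it starts with 'Assert',
--     # itself if it starts with 'assert', nothing otherwise (fences start with '`')
--     if line.startswith('Assert'):
--         return line[7:]
--     if line.startswith('assert'):
--         return line
--     return None
--
--
-- def extract_assertion_from_response(response: str):
--     lines = [line.strip() for line in response.split('\n')]
--     stop = _stop_index(lines)
--     cands = [c for c in map(_pick, lines[:stop]) if c is not None]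
--     return '\n'.join(cands)
-- ===== Notes on version B (the rewrite author's own statement) =====
-- stated objective: alternative
-- what changed: Replaces A's single state-machine loop (in_block flag with break) by a locate-then-filter decomposition: one pass finds the stop index (the second code-fence line, or end of input), then a stateless filter over the lines before it picks the assertion lines.
import Mathlib
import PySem

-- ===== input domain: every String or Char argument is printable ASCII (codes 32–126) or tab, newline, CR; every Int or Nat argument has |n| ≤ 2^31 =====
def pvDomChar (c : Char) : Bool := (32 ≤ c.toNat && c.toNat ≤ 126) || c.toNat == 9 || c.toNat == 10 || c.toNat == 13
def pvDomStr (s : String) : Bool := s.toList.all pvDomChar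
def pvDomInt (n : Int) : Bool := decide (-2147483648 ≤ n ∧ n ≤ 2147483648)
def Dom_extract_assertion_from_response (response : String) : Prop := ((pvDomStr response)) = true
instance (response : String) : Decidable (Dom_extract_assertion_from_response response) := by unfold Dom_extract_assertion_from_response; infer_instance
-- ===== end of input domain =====

-- B replaces A's single state-machine loop by a locate-the-second-fence pass followed by a
-- plain filter over the lines before it (objective: alternative decomposition, same cost).

-- ===== PORT A =====
-- A's loop: strip each line; a fence line toggles in_block / breaks; otherwise collect
-- 'Assert...'[7:] or 'assert...' lines into the accumulator (the `break` returns acc).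
def pvGoA : List (List Char) → Bool → List (List Char) → List (List Char)
  | [], _, acc => acc
  | l :: rest, in_block, acc =>
    let line := PySem.Chars.strip l
    if PySem.Chars.startswith line "```".toList then
      if in_block then acc else pvGoA rest true acc
    else
      if PySem.Chars.startswith line "Assert".toList then
        pvGoA rest in_block (acc ++ [PySem.Chars.slice line (some 7) none])
      else
        if PySem.Chars.startswith line "assert".toList then
          pvGoA rest in_block (acc ++ [line])
        else
          pvGoA rest in_block acc

def extract_assertion_from_response (response : String) : String :=
  String.ofList
    (PySem.Chars.join "\n".toList
      (pvGoA (PySem.Chars.splitOn response.toList "\n".toList) false []))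

-- ===== PORT B =====
-- Source B's _stop_index: index of the second fence line, or len(lines) with fewer than two
def pvStopIndex : List (List Char) → Bool → Nat
  | [], _ => 0
  | line :: rest, seen_fence =>
    if PySem.Chars.startswith line "```".toList then
      if seen_fence then 0 else 1 + pvStopIndex rest true
    else 1 + pvStopIndex rest seen_fence

-- Source B's _pick
def pvPick (line : List Char) : Option (List Char) :=
  if PySem.Chars.startswith line "Assert".toList then
    some (PySem.Chars.slice line (some 7) none)
  else
    if PySem.Chars.startswith line "assert".toList then some line
    else none

def extract_assertion_from_response_alt (response : String) : String :=
  let lines := (PySem.Chars.splitOn response.toList "\n".toList).map PySem.Chars.strip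
  let stop := pvStopIndex lines false
  String.ofList (PySem.Chars.join "\n".toList ((lines.take stop).filterMap pvPick))

-- ===== PRECONDITION & SPEC =====
def Spec_extract_assertion_from_response (response : String) (out : String) : Prop := out = extract_assertion_from_response_alt response
instance (response : String) (out : String) : Decidable (Spec_extract_assertion_from_response response out) := by unfold Spec_extract_assertion_from_response; infer_instance

-- ===== CLAIM (what is proved, stated in full; the proofs are below) =====
def Claim_equal_extract_assertion_from_response : Prop := ∀ (response : String), Dom_extract_assertion_from_response response → Spec_extract_assertion_from_response response (extract_assertion_from_response response)

-- ===== LEMMAS AND PROOFS =====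

-- a fence line starts with '`', so Source B's _pick rejects it
theorem pvPick_of_fence (line : List Char)
    (h : PySem.Chars.startswith line "```".toList = true) : pvPick line = none := by
  obtain ⟨t, ht⟩ := (PySem.Chars.startswith_iff line "```".toList).mp h
  subst ht
  unfold pvPick
  rw [if_neg, if_neg]
  · intro hc
    obtain ⟨u, hu⟩ := (PySem.Chars.startswith_iff _ _).mp hc
    simp at hu
  · intro hc
    obtain ⟨u, hu⟩ := (PySem.Chars.startswith_iff _ _).mp hc
    simp at hu

-- A's loop on raw lines equals B's take-then-filter on the stripped lines
theorem pvGoA_eq (xs : List (List Char)) :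
    ∀ (inb : Bool) (acc : List (List Char)),
      pvGoA xs inb acc =
        acc ++ (((xs.map PySem.Chars.strip).take
                  (pvStopIndex (xs.map PySem.Chars.strip) inb)).filterMap pvPick) := by
  induction xs with
  | nil => intro inb acc; simp [pvGoA, pvStopIndex]
  | cons l rest ih =>
    intro inb acc
    simp only [pvGoA, List.map_cons, pvStopIndex]
    by_cases hf : PySem.Chars.startswith (PySem.Chars.strip l) "```".toList = true
    · rw [if_pos hf, if_pos hf]
      cases inb with
      | true => simp
      | false =>
        simp only [Bool.false_eq_true, if_false, ih]
        rw [Nat.add_comm, List.take_succ_cons, List.filterMap_cons,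
            pvPick_of_fence _ hf]
    · rw [if_neg hf, if_neg hf, Nat.add_comm, List.take_succ_cons, List.filterMap_cons]
      by_cases hA : PySem.Chars.startswith (PySem.Chars.strip l) "Assert".toList = true
      · have hp : pvPick (PySem.Chars.strip l)
            = some (PySem.Chars.slice (PySem.Chars.strip l) (some 7) none) := by
          unfold pvPick; rw [if_pos hA]
        rw [if_pos hA, ih, hp]
        simp
      · rw [if_neg hA]
        by_cases ha : PySem.Chars.startswith (PySem.Chars.strip l) "assert".toList = true
        · have hp : pvPick (PySem.Chars.strip l) = some (PySem.Chars.strip l) := by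
            unfold pvPick; rw [if_neg hA, if_pos ha]
          rw [if_pos ha, ih, hp]
          simp
        · have hp : pvPick (PySem.Chars.strip l) = none := by
            unfold pvPick; rw [if_neg hA, if_neg ha]
          rw [if_neg ha, ih, hp]

-- ===== VERDICT (by name: the statement is the Claim_ definition above) =====
theorem extract_assertion_from_response_spec : Claim_equal_extract_assertion_from_response := by
  intro response _
  unfold Spec_extract_assertion_from_response
  unfold extract_assertion_from_response extract_assertion_from_response_alt
  rw [pvGoA_eq]
  simp
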